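-- pv_equiv track=rewrite | github.com/key2357/vcs_django | backend/util.py | msv_periodicity
-- ===== SOURCE A (Python) =====
-- def msv_periodicity(test_tuple):
--     periodicity_count = []
--     for i in range(len(test_tuple)):
--         periodicity_count.append(0)
--
--     for i in range(len(test_tuple)):
--         leaf_half = int((len(test_tuple) - i) / 2)
--         for j in range(2, leaf_half + 1):
--             is_break = False
--             if test_tuple[i: i + j] == test_tuple[i + j: i + 2*j]:
--                 is_continue = True
--                 periodicity_temp = 2
--                 start_index = i + 2 * j
--                 end_index = i + 2 * j
--                 while is_continue:
--                     if test_tuple[start_index: start_index+j] == test_tuple[i: i + j]: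
--                         periodicity_temp += 1
--                         is_continue = True
--                         start_index += j
--                         end_index = start_index
--                     else:
--                         is_break =True
--                         is_continue = False
--
--                 for k in range(i, end_index):
--                     if periodicity_count[k] < periodicity_temp:
--                         periodicity_count[k] = periodicity_temp
--             if is_break:
--                 break
--     return periodicity_count
-- ===== SOURCE B (Python) =====
-- def _lcp(t, a, b):
--     # length of the longest match t[a+k] == t[b+k] (k = 0,1,...), scanning once
--     n = len(t)
--     m = 0
--     while b + m < n and t[a + m] == t[b + m]:
--         m += 1
--     return m
--
--
-- def msv_periodicity(test_tuple):
--     n = len(test_tuple)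
--     res = [0] * n
--     for i in range(n):
--         for j in range(2, (n - i) // 2 + 1):
--             m = _lcp(test_tuple, i, i + j)
--             if m >= j:
--                 t = m // j + 1
--                 for k in range(i, i + t * j):
--                     if res[k] < t:
--                         res[k] = t
--                 break
--     return res
-- ===== Notes on version B (the rewrite author's own statement) =====
-- stated objective: faster
-- what changed: Instead of A's repeated slice-vs-slice block comparisons plus a while loop that counts repeated blocks one at a time, B computes a single longest-common-extension scan lcp(i, i+j) per candidate period and obtains the repetition count and the covered range in closed form as m//j + 1, avoiding all slice copies and the block-counting loop.
import Mathlib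
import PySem

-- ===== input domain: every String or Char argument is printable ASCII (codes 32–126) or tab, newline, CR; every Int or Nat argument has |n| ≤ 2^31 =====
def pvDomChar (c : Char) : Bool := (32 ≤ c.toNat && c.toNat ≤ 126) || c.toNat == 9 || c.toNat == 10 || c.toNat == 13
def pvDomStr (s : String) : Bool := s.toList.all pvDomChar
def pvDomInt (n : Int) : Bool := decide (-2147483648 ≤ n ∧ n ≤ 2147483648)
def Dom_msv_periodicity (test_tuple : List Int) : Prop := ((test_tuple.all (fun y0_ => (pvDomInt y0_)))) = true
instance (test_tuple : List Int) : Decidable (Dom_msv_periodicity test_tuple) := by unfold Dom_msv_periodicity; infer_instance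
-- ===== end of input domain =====

-- B replaces A's block-by-block slice comparisons and counting while-loop by one
-- longest-common-extension scan per candidate period and a closed-form count m / j + 1.

-- shared helper: 'for k in range(i, e): if counts[k] < t: counts[k] = t'
-- (both sources contain this identical loop; every call site keeps k < counts.length)
def pvUpdR (counts : List Int) (i e : Nat) (t : Int) : List Int :=
  (List.range' i (e - i)).foldl (fun c k => if c.getD k 0 < t then c.set k t else c) counts

-- ===== PORT A =====
-- the 'while is_continue' loop; fuel (tt.length + 1) only makes it total — the loop
-- advances start by j ≥ 2 and stops once start ≥ tt.length, so fuel is never exhausted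
def pvWhileA (tt : List Int) (i j : Nat) : Nat → Nat → Nat → Nat × Nat
  | 0, t, start => (t, start)
  | fuel+1, t, start =>
    if PySem.List.slice tt (some (start : Int)) (some ((start + j : Nat) : Int)) =
       PySem.List.slice tt (some (i : Int)) (some ((i + j : Nat) : Int))
    then pvWhileA tt i j fuel (t+1) (start+j)
    else (t, start)

-- the 'for j in range(2, leaf_half + 1)' loop with its break
def pvInnerA (tt : List Int) (i : Nat) : List Nat → List Int → List Int
  | [], counts => counts
  | j :: rest, counts =>
    if PySem.List.slice tt (some (i : Int)) (some ((i + j : Nat) : Int)) =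
       PySem.List.slice tt (some ((i + j : Nat) : Int)) (some ((i + 2*j : Nat) : Int))
    then
      let r := pvWhileA tt i j (tt.length + 1) 2 (i + 2*j)
      pvUpdR counts i r.2 (r.1 : Int)  -- update, then 'break'
    else pvInnerA tt i rest counts

-- int((n－i)/2) = (n−i) // 2 for nonnegative ints (exact below 2^52)
def msv_periodicity (test_tuple : List Int) : List Int :=
  let n := test_tuple.length
  let init := (List.range n).foldl (fun acc _ => acc ++ [(0 : Int)]) []
  (List.range n).foldl (fun counts i =>
    pvInnerA test_tuple i (List.range' 2 ((n - i)/2 + 1 - 2)) counts) init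

-- ===== PORT B =====
-- _lcp: 'm = 0; while b + m < n and t[a+m] == t[b+m]: m += 1; return m'
def pvLcp (tt : List Int) (a b : Nat) : Nat :=
  if _h : b < tt.length then
    if tt.getD a 0 = tt.getD b 0 then pvLcp tt (a+1) (b+1) + 1 else 0
  else 0
termination_by tt.length - b

def pvInnerB (tt : List Int) (i : Nat) : List Nat → List Int → List Int
  | [], counts => counts
  | j :: rest, counts =>
    let m := pvLcp tt i (i + j)
    if j ≤ m then
      pvUpdR counts i (i + (m / j + 1) * j) ((m / j + 1 : Nat) : Int)  -- then 'break'
    else pvInnerB tt i rest counts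

def msv_periodicity_alt (test_tuple : List Int) : List Int :=
  let n := test_tuple.length
  (List.range n).foldl (fun counts i =>
    pvInnerB test_tuple i (List.range' 2 ((n - i)/2 + 1 - 2)) counts)
    (List.replicate n 0)

-- ===== PRECONDITION & SPEC =====
def Spec_msv_periodicity (test_tuple : List Int) (out : List Int) : Prop := out = msv_periodicity_alt test_tuple
instance (test_tuple : List Int) (out : List Int) : Decidable (Spec_msv_periodicity test_tuple out) := by unfold Spec_msv_periodicity; infer_instance

-- ===== CLAIM (what is proved, stated in full; the proofs are below) =====
def Claim_equal_msv_periodicity : Prop := ∀ (test_tuple : List Int), Dom_msv_periodicity test_tuple → Spec_msv_periodicity test_tuple (msv_periodicity test_tuple)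

-- ===== LEMMAS AND PROOFS =====

-- pvLcp computes the longest pointwise match t[a+p] = t[b+p]
theorem pvLcp_ge_iff (tt : List Int) (k : Nat) : ∀ (a b : Nat), a ≤ b →
    (k ≤ pvLcp tt a b ↔ ∀ p < k, b + p < tt.length ∧ tt[a+p]? = tt[b+p]?) := by
  induction k with
  | zero => intro a b _; simp
  | succ k ih =>
    intro a b hab
    rw [pvLcp]
    by_cases hb : b < tt.length
    · have ha : a < tt.length := lt_of_le_of_lt hab hb
      have hAB : (tt[a]? = tt[b]?) ↔ tt.getD a 0 = tt.getD b 0 := by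
        simp [List.getD_eq_getElem?_getD, List.getElem?_eq_getElem ha,
              List.getElem?_eq_getElem hb]
      rw [dif_pos hb]
      by_cases he : tt.getD a 0 = tt.getD b 0
      · rw [if_pos he, Nat.add_le_add_iff_right, ih (a+1) (b+1) (by omega)]
        constructor
        · intro H p hp
          match p with
          | 0 => exact ⟨by omega, by simpa using hAB.mpr he⟩
          | p+1 =>
            obtain ⟨h1, h2⟩ := H p (by omega)
            refine ⟨by omega, ?_⟩
            rw [show a+(p+1) = a+1+p from by omega, show b+(p+1) = b+1+p from by omega]
            exact h2
        · intro H p hp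
          obtain ⟨h1, h2⟩ := H (p+1) (by omega)
          refine ⟨by omega, ?_⟩
          rw [show a+1+p = a+(p+1) from by omega, show b+1+p = b+(p+1) from by omega]
          exact h2
      · rw [if_neg he]
        constructor
        · intro h; exact absurd h (by omega)
        · intro H
          exfalso; apply he
          obtain ⟨h1, h2⟩ := H 0 (by omega)
          exact hAB.mp (by simpa using h2)
    · rw [dif_neg hb]
      constructor
      · intro h; exact absurd h (by omega)
      · intro H
        exfalso; exact hb (by have := (H 0 (by omega)).1; omega)

theorem pvLcp_le (tt : List Int) (a b : Nat) (hab : a ≤ b) :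
    pvLcp tt a b ≤ tt.length := by
  have h := pvLcp_ge_iff tt (pvLcp tt a b) a b hab
  generalize hgen : pvLcp tt a b = X at h ⊢
  clear hgen
  have h1 := h.mp (Nat.le_refl _)
  rcases Nat.eq_zero_or_pos X with hz | hz
  · omega
  · have h2 := (h1 (X - 1) (by omega)).1
    omega

theorem pvSeg_eq_iff (tt : List Int) (a b j : Nat) :
    ((tt.drop b).take j = (tt.drop a).take j) ↔ ∀ q < j, tt[b+q]? = tt[a+q]? := by
  constructor
  · intro h q hq
    have := congrArg (fun l => l[q]?) h
    simpa [List.getElem?_take, List.getElem?_drop, hq] using this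
  · intro H
    apply List.ext_getElem?
    intro q
    by_cases hq : q < j
    · simpa [List.getElem?_take, List.getElem?_drop, hq] using H q hq
    · simp [hq]

-- transitive chain: a p<k pointwise period j propagates over c whole blocks
theorem pvChain (tt : List Int) (i j k : Nat)
    (hG : ∀ p < k, tt[i+p]? = tt[i+j+p]?) :
    ∀ c q, q < j → c*j ≤ k → tt[i+q]? = tt[i + c*j + q]? := by
  intro c
  induction c with
  | zero =>
    intro q _ _
    rw [show i + 0*j + q = i + q from by omega]
  | succ c ih =>
    intro q hq hck
    have hs : (c+1)*j = c*j + j := by rw [Nat.add_mul, Nat.one_mul]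
    have h1 := ih q hq (by omega)
    have h2 := hG (c*j + q) (by omega)
    rw [h1, show i + c*j + q = i + (c*j+q) from by omega, h2,
        show i + j + (c*j+q) = i + (c+1)*j + q from by omega]

theorem pvBlock_iff (tt : List Int) (i j s : Nat) (_hj : 1 ≤ j) (hn : i + 2*j ≤ tt.length)
    (hinv : s*j ≤ pvLcp tt i (i+j)) :
    ((tt.drop (i+(s+1)*j)).take j = (tt.drop i).take j) ↔ (s+1)*j ≤ pvLcp tt i (i+j) := by
  have hge1 := pvLcp_ge_iff tt ((s+1)*j) i (i+j) (Nat.le_add_right i j)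
  have hge0 := pvLcp_ge_iff tt (s*j) i (i+j) (Nat.le_add_right i j)
  rw [pvSeg_eq_iff, hge1]
  have hGinv := hge0.mp hinv
  clear hge0 hge1 hinv
  have hG : ∀ p < s*j, tt[i+p]? = tt[i+j+p]? := fun p hp => (hGinv p hp).2
  have hs : (s+1)*j = s*j + j := by rw [Nat.add_mul, Nat.one_mul]
  constructor
  · intro H p hp
    by_cases hps : p < s*j
    · exact hGinv p hps
    · have hqj : p - s*j < j := by omega
      have hiq := (pvChain tt i j (s*j) hG s (p - s*j) hqj le_rfl).symm
      have hH := H (p - s*j) hqj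
      have hiq_lt : i + (p - s*j) < tt.length := by omega
      have hlen : i + (s+1)*j + (p - s*j) < tt.length := by
        have hsome : tt[i + (s+1)*j + (p - s*j)]? = tt[i + (p - s*j)]? := hH
        rw [List.getElem?_eq_getElem hiq_lt] at hsome
        obtain ⟨hlt, -⟩ := List.getElem?_eq_some_iff.mp hsome
        exact hlt
      refine ⟨by omega, ?_⟩
      rw [show i + p = i + s*j + (p - s*j) from by omega, hiq,
          show i + j + p = i + (s+1)*j + (p - s*j) from by omega, hH]
  · intro R q hq
    have hG2 : ∀ p < (s+1)*j, tt[i+p]? = tt[i+j+p]? := fun p hp => (R p hp).2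
    exact (pvChain tt i j ((s+1)*j) hG2 (s+1) q hq le_rfl).symm

theorem pvWhileA_eq (tt : List Int) (i j : Nat) (hj : 1 ≤ j) (hn : i + 2*j ≤ tt.length) :
    ∀ (fuel s : Nat), s*j ≤ pvLcp tt i (i+j) → pvLcp tt i (i+j) / j ≤ s + fuel →
    pvWhileA tt i j fuel (s+1) (i+(s+1)*j) =
      (pvLcp tt i (i+j) / j + 1, i + (pvLcp tt i (i+j) / j + 1) * j) := by
  intro fuel
  induction fuel with
  | zero =>
    intro s h1 h2
    have hs : s ≤ pvLcp tt i (i+j) / j := (Nat.le_div_iff_mul_le hj).mpr h1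
    clear h1
    generalize hq : pvLcp tt i (i+j) / j = q at hs h2 ⊢
    clear hq
    have he : q = s := Nat.le_antisymm (by omega) hs
    rw [he]
    rfl
  | succ fuel ih =>
    intro s h1 h2
    simp only [pvWhileA]
    rw [PySem.List.slice_natCast, PySem.List.slice_natCast,
        Nat.add_sub_cancel_left, Nat.add_sub_cancel_left]
    by_cases hc : (s+1)*j ≤ pvLcp tt i (i+j)
    · rw [if_pos ((pvBlock_iff tt i j s hj hn h1).mpr hc)]
      have hih := ih (s+1) hc
        (by rw [show s+1+fuel = s+(fuel+1) from by rw [Nat.add_right_comm, Nat.add_assoc]]; exact h2)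
      rw [show i+(s+1)*j+j = i+((s+1)+1)*j from by
            rw [Nat.add_mul (s+1) 1 j, Nat.one_mul]; exact Nat.add_assoc _ _ _]
      exact hih
    · rw [if_neg (fun h => hc ((pvBlock_iff tt i j s hj hn h1).mp h))]
      have hdiv : pvLcp tt i (i+j) / j < s+1 :=
        (Nat.div_lt_iff_lt_mul hj).mpr (Nat.lt_of_not_le hc)
      have hs : s ≤ pvLcp tt i (i+j) / j := (Nat.le_div_iff_mul_le hj).mpr h1
      have he : pvLcp tt i (i+j) / j = s := Nat.le_antisymm (Nat.lt_succ_iff.mp hdiv) hs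
      rw [he]

theorem pvInner_eq (tt : List Int) (i : Nat) :
    ∀ (js : List Nat) (counts : List Int), (∀ j ∈ js, 2 ≤ j ∧ i + 2*j ≤ tt.length) →
    pvInnerA tt i js counts = pvInnerB tt i js counts := by
  intro js
  induction js with
  | nil => intro counts _; rfl
  | cons j rest ih =>
    intro counts h
    obtain ⟨hj2, hn⟩ := h j List.mem_cons_self
    have hj : 1 ≤ j := Nat.le_of_succ_le hj2
    simp only [pvInnerA, pvInnerB]
    rw [PySem.List.slice_natCast, PySem.List.slice_natCast, Nat.add_sub_cancel_left,
        show i+2*j-(i+j) = j from by omega]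
    have hb0 := pvBlock_iff tt i j 0 hj hn (by rw [Nat.zero_mul]; exact Nat.zero_le _)
    simp only [Nat.zero_add, Nat.one_mul] at hb0
    by_cases hc : j ≤ pvLcp tt i (i+j)
    · rw [if_pos (hb0.mpr hc).symm, if_pos hc]
      have hm := pvLcp_le tt i (i+j) (Nat.le_add_right i j)
      have hw := pvWhileA_eq tt i j hj hn (tt.length + 1) 1
        (by rw [Nat.one_mul]; exact hc)
        (le_trans (Nat.div_le_self _ _) (le_trans hm (by omega)))
      rw [show i+2*j = i+(1+1)*j from by norm_num, show (2:Nat) = 1+1 from rfl, hw]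
    · rw [if_neg (fun hh => hc (hb0.mp hh.symm)), if_neg hc]
      exact ih counts (fun j' hj' => h j' (List.mem_cons_of_mem _ hj'))

-- ===== VERDICT (by name: the statement is the Claim_ definition above) =====
theorem msv_periodicity_spec : Claim_equal_msv_periodicity := by
  intro tt _
  show msv_periodicity tt = msv_periodicity_alt tt
  simp only [msv_periodicity, msv_periodicity_alt]
  have hinit : ∀ nn : Nat, (List.range nn).foldl (fun acc _ => acc ++ [(0 : Int)]) [] =
      List.replicate nn 0 := by
    intro nn
    induction nn with
    | zero => rfl
    | succ k ihk => rw [List.range_succ, List.foldl_append, ihk, List.replicate_succ']; rfl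
  rw [hinit]
  apply List.foldl_ext
  intro counts i _
  apply pvInner_eq
  intro j hj
  rw [List.mem_range'_1] at hj
  have hd : (tt.length - i)/2 * 2 ≤ tt.length - i := Nat.div_mul_le_self _ _
  exact ⟨by omega, by omega⟩
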